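-- pv_equiv track=rewrite | github.com/kelvinhuang0327/number-pattern-research | lottery_api/models/multi_bet_optimizer.py | _ts3_freq_ortho_bet
-- ===== SOURCE A (Python) =====
-- from collections import Counter, defaultdict
-- from typing import List, Dict, Tuple, Set
--
-- def _ts3_freq_ortho_bet(history: List[Dict], max_num: int, pick_count: int, window: int = 200, exclude: Set[int] = None) -> List[int]:
--     """Frequency Orthogonal Logic (w=200)"""
--     exclude = exclude or set()
--     all_nums = [n for d in history[-window:] for n in d['numbers']]
--     freq = Counter(all_nums)
--     candidates = [(n, freq.get(n, 0)) for n in range(1, max_num + 1) if n not in exclude]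
--     candidates.sort(key=lambda x: -x[1])
--     res = [n for n, _ in candidates[:pick_count]]
--     return sorted(res)
-- ===== SOURCE B (Python) =====
-- from collections import Counter
--
-- def _ts3_freq_ortho_bet(history, max_num, pick_count, window=200, exclude=None):
--     """Frequency Orthogonal Logic (w=200) — per-frequency bucket scan instead of a comparison sort."""
--     exclude = exclude or set()
--     freq = Counter(n for d in history[-window:] for n in d['numbers'])
--     freqs = set(freq.get(n, 0) for n in range(1, max_num + 1) if n not in exclude)
--     ordered = []
--     for f in sorted(freqs, reverse=True):
--         ordered += [n for n in range(1, max_num + 1) if n not in exclude and freq.get(n, 0) == f]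
--     return sorted(ordered[:pick_count])
-- ===== Notes on version B (the rewrite author's own statement) =====
-- stated objective: alternative
-- what changed: Replaced the comparison sort of (number, frequency) pairs by a counting/bucket strategy: the distinct frequencies of the candidate numbers are collected and sorted descending, and for each frequency the candidate range is scanned once in ascending order, which reproduces the stable tie-break exactly without sorting the candidates.
import Mathlib
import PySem

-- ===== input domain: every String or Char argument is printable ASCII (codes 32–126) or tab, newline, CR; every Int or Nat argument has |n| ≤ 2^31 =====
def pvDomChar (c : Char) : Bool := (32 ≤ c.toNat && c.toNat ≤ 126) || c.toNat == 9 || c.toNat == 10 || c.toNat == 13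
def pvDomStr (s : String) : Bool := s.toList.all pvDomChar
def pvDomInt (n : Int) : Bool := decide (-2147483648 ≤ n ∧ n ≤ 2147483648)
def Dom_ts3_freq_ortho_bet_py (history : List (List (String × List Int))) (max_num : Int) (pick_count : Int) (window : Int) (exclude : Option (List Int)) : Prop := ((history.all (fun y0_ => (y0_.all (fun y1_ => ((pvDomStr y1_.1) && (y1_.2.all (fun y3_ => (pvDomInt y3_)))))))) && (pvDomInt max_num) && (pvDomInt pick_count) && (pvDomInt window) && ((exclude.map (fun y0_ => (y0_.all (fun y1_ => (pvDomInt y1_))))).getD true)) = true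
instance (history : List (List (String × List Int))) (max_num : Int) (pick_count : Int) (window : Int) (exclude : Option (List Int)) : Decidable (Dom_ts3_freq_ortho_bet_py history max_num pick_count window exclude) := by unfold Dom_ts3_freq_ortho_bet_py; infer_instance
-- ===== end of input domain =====

-- B replaces A's comparison sort of (number, frequency) pairs by a bucket scan: the distinct
-- frequencies sorted descending, then one ascending pass over the candidate range per
-- frequency; same return value everywhere A returns (KeyError inputs excluded by Pre_).

-- ===== PORT A =====
-- Stack-safe implementations of Python's sorted()/list.sort(); both ports use them where
-- their Python sorts a list that can be large (PySem.List.sorted, an interpreted insertion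
-- sort, cannot be evaluated on such lists).  pySortInt is sorted(xs) on ints, where any
-- stable sort returns the unique ≤-ordered permutation; pySortPairs is
-- candidates.sort(key=lambda x: -x[1]) with the tie-break Python's stable sort gives it at
-- its only call site (the pairs arrive with strictly ascending first components):
-- lemma pySortPairs_eq below proves it equal to PySem.List.sorted _ (fun x => -x.2) there.
def pySortInt (xs : List Int) : List Int :=
  xs.mergeSort (fun a b => decide (a ≤ b))

def pySortPairs (xs : List (Int × Int)) : List (Int × Int) :=
  xs.mergeSort (fun a b => decide (-a.2 < -b.2 ∨ (-a.2 = -b.2 ∧ a.1 ≤ b.1)))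

def ts3_freq_ortho_bet_py (history : List (List (String × List Int))) (max_num : Int) (pick_count : Int) (window : Int) (exclude : Option (List Int)) : List Int :=
  let ex : List Int := exclude.getD []
  -- all_nums = [n for d in history[-window:] for n in d['numbers']] ; d['numbers'] raises
  -- KeyError when the key is absent — those inputs are excluded by Pre_ below.
  let all_nums : List Int :=
    (PySem.List.slice history (some (-window)) none).flatMap
      (fun d => ((PySem.Dict.mk d).get? "numbers").getD [])
  let freq := PySem.Dict.counter all_nums
  let candidates : List (Int × Int) :=
    ((PySem.List.pyRange 1 (max_num + 1)).filter (fun n => !(ex.contains n))).map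
      (fun n => (n, freq.getD n 0))
  let sortedC := pySortPairs candidates
  let res := (PySem.List.slice sortedC none (some pick_count)).map (fun x => x.1)
  pySortInt res

-- ===== PORT B =====
def ts3_freq_ortho_bet_py_alt (history : List (List (String × List Int))) (max_num : Int) (pick_count : Int) (window : Int) (exclude : Option (List Int)) : List Int :=
  let ex : List Int := exclude.getD []
  let all_nums : List Int :=
    (PySem.List.slice history (some (-window)) none).flatMap
      (fun d => ((PySem.Dict.mk d).get? "numbers").getD [])
  let freq := PySem.Dict.counter all_nums
  let freqs : PySem.Set Int :=
    PySem.Set.ofList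
      (((PySem.List.pyRange 1 (max_num + 1)).filter (fun n => !(ex.contains n))).map
        (fun n => freq.getD n 0))
  let ordered : List Int :=
    (PySem.List.sorted freqs (fun v => v) true).foldl
      (fun acc f => acc ++
        (PySem.List.pyRange 1 (max_num + 1)).filter
          (fun n => !(ex.contains n) && freq.getD n 0 == f)) []
  pySortInt (PySem.List.slice ordered none (some pick_count))

-- ===== PRECONDITION & SPEC =====
-- Pre_ excludes exactly the inputs where Python A raises KeyError: a dict inside the
-- history[-window:] slice without the key 'numbers'.
def Pre_ts3_freq_ortho_bet_py (history : List (List (String × List Int))) (max_num : Int) (pick_count : Int) (window : Int) (exclude : Option (List Int)) : Prop :=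
  ∀ d ∈ PySem.List.slice history (some (-window)) none, (PySem.Dict.mk d).contains "numbers" = true
instance (history : List (List (String × List Int))) (max_num : Int) (pick_count : Int) (window : Int) (exclude : Option (List Int)) : Decidable (Pre_ts3_freq_ortho_bet_py history max_num pick_count window exclude) := by unfold Pre_ts3_freq_ortho_bet_py; infer_instance
def pvWitness_ts3_freq_ortho_bet_py : (List (List (String × List Int))) × Int × Int × Int × Option (List Int) :=
  ([[("numbers", [1, 2, 2])], [("numbers", [2, 3])]], 4, 2, 200, some [3])
def Spec_ts3_freq_ortho_bet_py (history : List (List (String × List Int))) (max_num : Int) (pick_count : Int) (window : Int) (exclude : Option (List Int)) (out : List Int) : Prop := out = ts3_freq_ortho_bet_py_alt history max_num pick_count window exclude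
instance (history : List (List (String × List Int))) (max_num : Int) (pick_count : Int) (window : Int) (exclude : Option (List Int)) (out : List Int) : Decidable (Spec_ts3_freq_ortho_bet_py history max_num pick_count window exclude out) := by unfold Spec_ts3_freq_ortho_bet_py; infer_instance

-- ===== CLAIM (what is proved, stated in full; the proofs are below) =====
def Claim_equal_ts3_freq_ortho_bet_py : Prop := ∀ (history : List (List (String × List Int))) (max_num : Int) (pick_count : Int) (window : Int) (exclude : Option (List Int)), Dom_ts3_freq_ortho_bet_py history max_num pick_count window exclude → Pre_ts3_freq_ortho_bet_py history max_num pick_count window exclude → Spec_ts3_freq_ortho_bet_py history max_num pick_count window exclude (ts3_freq_ortho_bet_py history max_num pick_count window exclude)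

-- ===== LEMMAS AND PROOFS =====

-- insertBy puts x after a block that never triggers `before` and in front of a block that always does
theorem insertBy_split {α : Type} (b : α → α → Bool) (x : α) (l1 l2 : List α)
    (h1 : ∀ a ∈ l1, b x a = false) (h2 : ∀ a ∈ l2, b x a = true) :
    PySem.List.insertBy b x (l1 ++ l2) = l1 ++ x :: l2 := by
  induction l1 with
  | nil =>
    cases l2 with
    | nil => simp [PySem.List.insertBy]
    | cons a t => simp [PySem.List.insertBy, h2 a (by simp)]
  | cons a t ih =>
    have ha : b x a = false := h1 a (by simp)
    simp only [List.cons_append, PySem.List.insertBy, ha, Bool.false_eq_true, if_false]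
    simp [ih (fun y hy => h1 y (by simp [hy]))]

-- a strictly increasing list splits into its <v, =v and >v parts in that order
theorem strict_sorted_decomp (V : List Int) (v : Int) (h : V.Pairwise (· < ·)) :
    V = V.filter (fun u => decide (u < v)) ++ V.filter (fun u => decide (u = v))
        ++ V.filter (fun u => decide (v < u)) := by
  induction V with
  | nil => simp
  | cons u t ih =>
    have hu : ∀ w ∈ t, u < w := by
      intro w hw; exact (List.pairwise_cons.mp h).1 w hw
    have ht := ih (List.pairwise_cons.mp h).2
    rcases lt_trichotomy u v with hlt | heq | hgt
    · rw [List.filter_cons, List.filter_cons, List.filter_cons,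
        if_pos (by simp [hlt]), if_neg (by simp [ne_of_lt hlt]),
        if_neg (by simp [not_lt_of_gt hlt]), List.cons_append, List.cons_append]
      rw [← ht]
    · subst heq
      have t1 : t.filter (fun w => decide (w < u)) = [] :=
        List.filter_eq_nil_iff.mpr (fun w hw => by simp [not_lt_of_gt (hu w hw)])
      have t2 : t.filter (fun w => decide (w = u)) = [] :=
        List.filter_eq_nil_iff.mpr (fun w hw => by simp [(ne_of_gt (hu w hw))])
      have t3 : t.filter (fun w => decide (u < w)) = t :=
        List.filter_eq_self.mpr (fun w hw => by simp [hu w hw])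
      simp [t1, t2, t3]
    · have t1 : t.filter (fun w => decide (w < v)) = [] :=
        List.filter_eq_nil_iff.mpr (fun w hw => by simp [not_lt_of_gt (lt_trans hgt (hu w hw))])
      have t2 : t.filter (fun w => decide (w = v)) = [] :=
        List.filter_eq_nil_iff.mpr (fun w hw => by simp [(ne_of_gt (lt_trans hgt (hu w hw)))])
      have t3 : t.filter (fun w => decide (v < w)) = t :=
        List.filter_eq_self.mpr (fun w hw => by simp [lt_trans hgt (hu w hw)])
      simp [t1, t2, t3, not_lt_of_gt hgt, hgt, hgt.ne']

theorem nodup_filter_eq_singleton (V : List Int) (v : Int) (hnd : V.Nodup) (hv : v ∈ V) :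
    V.filter (fun u => decide (u = v)) = [v] := by
  induction V with
  | nil => cases hv
  | cons a t ih =>
    rcases List.mem_cons.mp hv with rfl | hvt
    · have t0 : t.filter (fun u => decide (u = v)) = [] :=
        List.filter_eq_nil_iff.mpr (fun w hw => by
          simp only [decide_eq_true_eq]
          exact fun h => (List.nodup_cons.mp hnd).1 (h ▸ hw))
      simp [t0]
    · have hne : a ≠ v := fun h => (List.nodup_cons.mp hnd).1 (h ▸ hvt)
      rw [List.filter_cons, if_neg (by simp [hne])]
      exact ih (List.nodup_cons.mp hnd).2 hvt

-- the stable sort by an Int key is the concatenation of the key fibres, keys ascending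
theorem stable_sort_buckets {α : Type} (xs : List α) (key : α → Int) :
    PySem.List.sorted xs key
      = (PySem.List.sorted (PySem.Set.ofList (xs.map key)) (fun v => v)).flatMap
          (fun v => xs.filter (fun x => decide (key x = v))) := by
  induction xs using List.reverseRecOn with
  | nil => simp [PySem.Set.ofList, PySem.Set.empty]; rfl
  | append_singleton p x ih =>
    have hfold : PySem.List.sorted (p ++ [x]) key
        = PySem.List.insertBy (fun a b => decide (key a < key b)) x (PySem.List.sorted p key) := by
      rw [PySem.List.sorted_eq_foldl_insertBy (p ++ [x]) key, List.foldl_append]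
      simp only [List.foldl_cons, List.foldl_nil]
      rw [← PySem.List.sorted_eq_foldl_insertBy p key]
    rw [hfold, ih]
    set V := PySem.List.sorted (PySem.Set.ofList (p.map key)) (fun v : Int => v) with hV
    have hVlt : V.Pairwise (· < ·) := PySem.List.sorted_ofList_pairwise_lt _
    have hVnd : V.Nodup := hVlt.imp (fun h => ne_of_lt h)
    set fib : Int → List α := fun u => p.filter (fun y => decide (key y = u)) with hfib
    set A := V.filter (fun u => decide (u < key x)) with hA
    set B := V.filter (fun u => decide (key x < u)) with hB
    have memA : ∀ u ∈ A, u < key x := fun u hu => by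
      simpa using (List.mem_filter.mp hu).2
    have memB : ∀ u ∈ B, key x < u := fun u hu => by
      simpa using (List.mem_filter.mp hu).2
    have hdec := strict_sorted_decomp V (key x) hVlt
    have keyfib : ∀ u, ∀ a ∈ fib u, key a = u := fun u a ha => by
      simpa using (List.mem_filter.mp ha).2
    have h1 : ∀ a ∈ A.flatMap fib ++ fib (key x), (decide (key x < key a)) = false := by
      intro a ha
      rcases List.mem_append.mp ha with h | h
      · rcases List.mem_flatMap.mp h with ⟨u, hu, hafib⟩
        rw [keyfib u a hafib]
        simp [not_lt_of_gt (memA u hu)]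
      · rw [keyfib (key x) a h]; simp
    have h2 : ∀ a ∈ B.flatMap fib, (decide (key x < key a)) = true := by
      intro a ha
      rcases List.mem_flatMap.mp ha with ⟨u, hu, hafib⟩
      rw [keyfib u a hafib]
      simp [memB u hu]
    have hfib' : ∀ u, (p ++ [x]).filter (fun y => decide (key y = u))
        = fib u ++ (if key x = u then [x] else []) := by
      intro u
      rw [List.filter_append, hfib]
      by_cases h : key x = u <;> simp [h]
    have hmapkey : (p ++ [x]).map key = p.map key ++ [key x] := by simp
    have hofl2 : PySem.Set.ofList (p.map key ++ [key x])
        = (PySem.Set.ofList (p.map key)).add (key x) := by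
      simp [PySem.Set.ofList, List.foldl_append]
    by_cases hvmem : key x ∈ V
    · -- the key of x already occurs among the keys of p
      have hM : V.filter (fun u => decide (u = key x)) = [key x] :=
        nodup_filter_eq_singleton V (key x) hVnd hvmem
      have hVsplit : V = A ++ key x :: B := by
        rw [hdec, hM]; rw [← hA, ← hB]; simp
      have hkeys : PySem.Set.ofList ((p ++ [x]).map key) = PySem.Set.ofList (p.map key) := by
        rw [hmapkey, hofl2, PySem.Set.add,
          if_pos (show (PySem.Set.ofList (List.map key p)).contains (key x) = true by
            rw [PySem.Set.contains]
            exact List.contains_iff_mem.mpr ((PySem.List.mem_sorted _ _ _ _).mp hvmem))]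
      rw [hkeys, ← hV]
      conv_lhs => rw [hVsplit]
      conv_rhs => rw [hVsplit]
      rw [List.flatMap_append, List.flatMap_cons, List.flatMap_append, List.flatMap_cons]
      rw [show (B.flatMap (fun v => List.filter (fun x_1 => decide (key x_1 = v)) (p ++ [x])))
            = B.flatMap fib from
        List.flatMap_congr (fun u hu => by
          rw [hfib' u, if_neg (fun h => absurd (h ▸ memB u hu) (lt_irrefl _)), List.append_nil])]
      rw [show (A.flatMap (fun v => List.filter (fun x_1 => decide (key x_1 = v)) (p ++ [x])))
            = A.flatMap fib from
        List.flatMap_congr (fun u hu => by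
          rw [hfib' u, if_neg (fun h => absurd (h ▸ memA u hu) (lt_irrefl _)), List.append_nil])]
      rw [hfib' (key x), if_pos rfl]
      rw [← List.append_assoc]
      rw [insertBy_split _ x (A.flatMap fib ++ fib (key x)) (B.flatMap fib) h1 h2]
      simp [hfib]
    · -- a genuinely new key value
      have hM : V.filter (fun u => decide (u = key x)) = [] :=
        List.filter_eq_nil_iff.mpr (fun u hu => by
          simp only [decide_eq_true_eq]
          exact fun h => hvmem (h ▸ hu))
      have hVsplit : V = A ++ B := by
        rw [hdec, hM]; rw [← hA, ← hB]; simp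
      have hfibx : fib (key x) = [] := by
        rw [hfib]
        refine List.filter_eq_nil_iff.mpr (fun y hy => by
          simp only [decide_eq_true_eq]
          intro h
          exact hvmem ((PySem.List.mem_sorted _ _ _ _).mpr
            ((PySem.Set.mem_ofList _ _).mpr (List.mem_map.mpr ⟨y, hy, h⟩))))
      have hnotofl : ¬ key x ∈ PySem.Set.ofList (p.map key) :=
        fun h => hvmem ((PySem.List.mem_sorted _ _ _ _).mpr h)
      have hkeys : PySem.List.sorted (PySem.Set.ofList ((p ++ [x]).map key)) (fun v : Int => v)
          = A ++ key x :: B := by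
        rw [hmapkey, hofl2, PySem.Set.add,
          if_neg (show ¬ (PySem.Set.ofList (List.map key p)).contains (key x) = true by
            rw [PySem.Set.contains]
            exact fun h => hnotofl (List.contains_iff_mem.mp h))]
        apply PySem.List.sorted_eq_of_perm_of_pairwise_lt
        · have p1 : (A ++ key x :: B).Perm (key x :: (A ++ B)) := List.perm_middle
          have p2 : (key x :: (A ++ B)).Perm (key x :: PySem.Set.ofList (List.map key p)) := by
            rw [← hVsplit]
            exact (PySem.List.sorted_perm _ _ _).cons (key x)
          have p3 : (key x :: PySem.Set.ofList (List.map key p)).Perm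
              (PySem.Set.ofList (List.map key p) ++ [key x]) :=
            (List.perm_append_singleton _ _).symm
          exact (p1.trans p2).trans p3
        · have hApw : A.Pairwise (fun a b => a < b) := hVlt.filter _
          have hBpw : B.Pairwise (fun a b => a < b) := hVlt.filter _
          rw [List.pairwise_append]
          refine ⟨hApw, ?_, ?_⟩
          · rw [List.pairwise_cons]
            exact ⟨fun b hb => memB b hb, hBpw⟩
          · intro a ha b hb
            rcases List.mem_cons.mp hb with rfl | hbB
            · exact memA a ha
            · exact lt_trans (memA a ha) (memB b hbB)
      rw [hkeys]
      conv_lhs => rw [hVsplit]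
      rw [List.flatMap_append, List.flatMap_append, List.flatMap_cons]
      rw [show (B.flatMap (fun v => List.filter (fun x_1 => decide (key x_1 = v)) (p ++ [x])))
            = B.flatMap fib from
        List.flatMap_congr (fun u hu => by
          rw [hfib' u, if_neg (fun h => absurd (h ▸ memB u hu) (lt_irrefl _)), List.append_nil])]
      rw [show (A.flatMap (fun v => List.filter (fun x_1 => decide (key x_1 = v)) (p ++ [x])))
            = A.flatMap fib from
        List.flatMap_congr (fun u hu => by
          rw [hfib' u, if_neg (fun h => absurd (h ▸ memA u hu) (lt_irrefl _)), List.append_nil])]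
      rw [hfib' (key x), if_pos rfl, hfibx]
      have h1' : ∀ a ∈ A.flatMap fib, (decide (key x < key a)) = false := by
        intro a ha; exact h1 a (by rw [hfibx]; simpa using ha)
      rw [insertBy_split _ x (A.flatMap fib) (B.flatMap fib) h1' h2]
      simp

theorem ofList_map_neg (l : List Int) :
    PySem.Set.ofList (l.map (fun z => -z)) = (PySem.Set.ofList l).map (fun z => -z) := by
  induction l using List.reverseRecOn with
  | nil => simp [PySem.Set.ofList, PySem.Set.empty]
  | append_singleton p x ih =>
    have e1 : PySem.Set.ofList (p.map (fun z => -z) ++ [-x])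
        = (PySem.Set.ofList (p.map (fun z => -z))).add (-x) := by
      simp [PySem.Set.ofList, List.foldl_append]
    have e2 : PySem.Set.ofList (p ++ [x]) = (PySem.Set.ofList p).add x := by
      simp [PySem.Set.ofList, List.foldl_append]
    rw [List.map_append]
    simp only [List.map_cons, List.map_nil]
    rw [e1, e2, PySem.Set.add, PySem.Set.add, ih]
    by_cases hm : x ∈ PySem.Set.ofList p
    · simp [(PySem.Set.mem_ofList p x).mp hm]
    · simp [show ¬ x ∈ p from fun h => hm ((PySem.Set.mem_ofList p x).mpr h)]

-- sorting negated keys ascending = sorting the keys descending, then negating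
theorem sorted_map_neg (S : List Int) (hnd : S.Nodup) :
    PySem.List.sorted (S.map (fun z => -z)) (fun v => v)
      = (PySem.List.sorted S (fun v => v) true).map (fun z => -z) := by
  apply PySem.List.sorted_eq_of_perm_of_pairwise_lt
  · exact (PySem.List.sorted_perm S (fun v => v) true).map _
  · have hge := PySem.List.sorted_pairwise_rev S (fun v => v)
    have hnd' : (PySem.List.sorted S (fun v => v) true).Nodup :=
      (PySem.List.sorted_perm S (fun v => v) true).symm.nodup hnd
    have hgt : (PySem.List.sorted S (fun v => v) true).Pairwise (fun a b => b < a) :=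
      (hge.and hnd').imp (fun h => lt_of_le_of_ne h.1 (Ne.symm h.2))
    exact List.pairwise_map.mpr (hgt.imp (fun h => by omega))

theorem slice_map_take {α β : Type} (f : α → β) (l : List α) (b : Int) :
    PySem.List.slice (l.map f) none (some b) = (PySem.List.slice l none (some b)).map f := by
  simp [PySem.List.slice, PySem.List.clampIdx, List.map_take]

-- the strictly increasing integer range
theorem pyRange_pairwise_lt (a b : Int) : (PySem.List.pyRange a b).Pairwise (· < ·) := by
  by_cases h : a < b
  · rw [PySem.List.pyRange_one_cons h]
    refine List.pairwise_cons.mpr ⟨fun x hx => ?_, pyRange_pairwise_lt (a + 1) b⟩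
    have := PySem.List.mem_pyRange_one.mp hx
    omega
  · have : PySem.List.pyRange a b = [] := by
      refine List.eq_nil_iff_forall_not_mem.mpr (fun x hx => ?_)
      have := PySem.List.mem_pyRange_one.mp hx
      omega
    rw [this]
    exact List.Pairwise.nil
termination_by (b - a).toNat
decreasing_by omega

-- on a list with strictly ascending first components, the efficient lexicographic merge
-- sort computes exactly Python's stable sort by the key -x[1]
theorem pySortPairs_eq (xs : List (Int × Int)) (hasc : xs.Pairwise (fun a b => a.1 < b.1)) :
    pySortPairs xs = PySem.List.sorted xs (fun x => -x.2) := by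
  have hperm : (pySortPairs xs).Perm (PySem.List.sorted xs (fun x => -x.2)) :=
    (List.mergeSort_perm _ _).trans (PySem.List.sorted_perm _ _ _).symm
  have hle : (pySortPairs xs).Pairwise
      (fun a b => decide (-a.2 < -b.2 ∨ (-a.2 = -b.2 ∧ a.1 ≤ b.1)) = true) :=
    List.pairwise_mergeSort
      (fun a b c hab hbc => by
        simp only [decide_eq_true_eq] at *
        omega)
      (fun a b => by
        simp only [Bool.or_eq_true, decide_eq_true_eq]
        omega)
      xs
  have hnodup : ((pySortPairs xs).map (fun x : Int × Int => x.1)).Nodup := by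
    have h0 : (xs.map (fun x : Int × Int => x.1)).Nodup :=
      List.pairwise_map.mpr (hasc.imp (fun h => ne_of_lt h))
    simp only [pySortPairs]
    exact ((List.mergeSort_perm xs _).map (fun x : Int × Int => x.1)).symm.nodup h0
  have hne : (pySortPairs xs).Pairwise (fun a b => a.1 ≠ b.1) :=
    List.pairwise_map.mp hnodup
  have hR1 : (pySortPairs xs).Pairwise
      (fun a b => -a.2 < -b.2 ∨ (-a.2 = -b.2 ∧ a.1 < b.1)) :=
    (hle.and hne).imp (fun h => by
      rcases h with ⟨h1, h2⟩
      simp only [decide_eq_true_eq] at h1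
      omega)
  have hR2 : (PySem.List.sorted xs (fun x => -x.2)).Pairwise
      (fun a b => -a.2 < -b.2 ∨ (-a.2 = -b.2 ∧ a.1 < b.1)) := by
    rw [stable_sort_buckets xs (fun x => -x.2)]
    refine List.pairwise_flatMap.mpr ⟨fun v _ => ?_, ?_⟩
    · refine (hasc.filter _).imp_of_mem (fun {a b} ha hb h => ?_)
      have hva : -a.2 = v := by simpa using (List.mem_filter.mp ha).2
      have hvb : -b.2 = v := by simpa using (List.mem_filter.mp hb).2
      omega
    · refine (PySem.List.sorted_ofList_pairwise_lt _).imp (fun {v w} hvw => ?_)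
      intro x hx y hy
      have hvx : -x.2 = v := by simpa using (List.mem_filter.mp hx).2
      have hwy : -y.2 = w := by simpa using (List.mem_filter.mp hy).2
      omega
  exact List.Perm.eq_of_pairwise
    (fun a b _ _ h1 h2 => by
      exfalso
      rcases h1 with h1 | ⟨_, h1⟩ <;> rcases h2 with h2 | ⟨_, h2⟩ <;> omega)
    hR1 hR2 hperm

-- numbers sorted stably by descending frequency = frequency buckets, frequencies descending
theorem bucket_eq (nums : List Int) (c : Int → Int) :
    (PySem.List.sorted (nums.map (fun n => (n, c n))) (fun x => -x.2)).map (fun x => x.1)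
      = (PySem.List.sorted (PySem.Set.ofList (nums.map c)) (fun v => v) true).flatMap
          (fun f => nums.filter (fun n => decide (c n = f))) := by
  rw [stable_sort_buckets (nums.map fun n => (n, c n)) (fun x => -x.2)]
  rw [List.map_flatMap]
  have hmk : ((nums.map fun n => (n, c n)).map (fun x : Int × Int => -x.2))
      = (nums.map c).map (fun z => -z) := by
    simp [List.map_map, Function.comp]
  rw [hmk, ofList_map_neg, sorted_map_neg _ (PySem.Set.nodup_ofList _), List.flatMap_map]
  refine List.flatMap_congr (fun f _ => ?_)
  rw [List.filter_map, List.map_map]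
  have hpred : ((fun x : Int × Int => decide (-x.2 = -f)) ∘ (fun n => (n, c n)))
      = fun n => decide (c n = f) := by
    funext n; simp
  rw [hpred]
  have hfst : ((fun x : Int × Int => x.1) ∘ (fun n : Int => (n, c n))) = id := by
    funext n; rfl
  rw [hfst, List.map_id]

-- ===== VERDICT (by name: the statement is the Claim_ definition above) =====
theorem ts3_freq_ortho_bet_py_spec : Claim_equal_ts3_freq_ortho_bet_py := by
  unfold Claim_equal_ts3_freq_ortho_bet_py
  intro history max_num pick_count window exclude _ _
  unfold Spec_ts3_freq_ortho_bet_py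
  simp only [ts3_freq_ortho_bet_py, ts3_freq_ortho_bet_py_alt]
  set ex : List Int := exclude.getD [] with hex
  set all_nums : List Int :=
    (PySem.List.slice history (some (-window)) none).flatMap
      (fun d => ((PySem.Dict.mk d).get? "numbers").getD []) with hall
  set nums : List Int :=
    (PySem.List.pyRange 1 (max_num + 1)).filter (fun n => !(ex.contains n)) with hnums
  set c : Int → Int := fun n => (PySem.Dict.counter all_nums).getD n 0 with hc
  have hfilters : ∀ f : Int,
      (PySem.List.pyRange 1 (max_num + 1)).filter
          (fun n => !(ex.contains n) && (PySem.Dict.counter all_nums).getD n 0 == f)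
        = nums.filter (fun n => decide (c n = f)) := by
    intro f
    rw [hnums, List.filter_filter]
    refine List.filter_congr (fun n _ => ?_)
    rw [hc]
    cases h : ((PySem.Dict.counter all_nums).getD n 0 == f) <;>
      simp_all [Bool.and_comm]
  have hmap : nums.map (fun n => (n, (PySem.Dict.counter all_nums).getD n 0))
      = nums.map (fun n => (n, c n)) := by rw [hc]
  rw [PySem.List.foldl_append_eq_flatMap, List.nil_append,
    List.flatMap_congr (fun f _ => hfilters f)]
  have hasc : (nums.map (fun n => (n, c n))).Pairwise (fun a b => a.1 < b.1) := by
    refine List.pairwise_map.mpr ?_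
    exact ((pyRange_pairwise_lt 1 (max_num + 1)).filter _).imp (fun h => h)
  rw [hmap, pySortPairs_eq _ hasc, ← slice_map_take, bucket_eq nums c]
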